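-- pv_equiv track=rewrite | github.com/gillsB/Alternative-Desktop-Python | util/settings.py | add_angle_brackets
-- ===== SOURCE A (Python) =====
-- def add_angle_brackets(text):
--     modifiers = {"alt", "ctrl", "shift"}  # Define the modifier keys
--     special_keys = {
--         "f1", "f2", "f3", "f4", "f5", "f6", "f7", "f8", "f9", "f10", "f11", "f12",
--         "left", "right", "up", "down",  # Arrow keys
--         "insert", "delete", "home", "end", "pageup", "pagedown",  # Navigation keys
--         "numpad0", "numpad1", "numpad2", "numpad3", "numpad4", "numpad5", "numpad6", "numpad7", "numpad8", "numpad9",  # Numpad keys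
--         "enter", "space", "tab", "esc"  # Other keys
--     }
--
--     # Combine modifiers and special keys into a single dictionary with their lengths
--     all_keys = {**{mod: len(mod) for mod in modifiers}, **{key: len(key) for key in special_keys}}
--
--     result = []
--     i = 0
--
--     while i < len(text):
--         found_key = False
--
--         # Check for all keys in descending order of length
--         for key, length in sorted(all_keys.items(), key=lambda x: -x[1]):
--             if text[i:i + length].lower() == key:
--                 result.append(f"<{text[i:i + length]}>")
--                 i += length
--                 found_key = True
--                 break
--
--         if not found_key:
--             # Append regular characters
--             result.append(text[i])
--             i += 1
--
--     return ''.join(result)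
-- ===== SOURCE B (Python) =====
-- def add_angle_brackets(text):
--     keys = [
--         "alt", "ctrl", "shift",
--         "f1", "f2", "f3", "f4", "f5", "f6", "f7", "f8", "f9", "f10", "f11", "f12",
--         "left", "right", "up", "down",
--         "insert", "delete", "home", "end", "pageup", "pagedown",
--         "numpad0", "numpad1", "numpad2", "numpad3", "numpad4", "numpad5",
--         "numpad6", "numpad7", "numpad8", "numpad9",
--         "enter", "space", "tab", "esc",
--     ]
--     # Build a trie (prefix-tree automaton) over the keys once, as a flat node list:
--     # nodes[v] = [accepting, {char: child_index}].
--     nodes = [[False, {}]]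
--     for k in keys:
--         cur = 0
--         for ch in k:
--             nxt = nodes[cur][1].get(ch)
--             if nxt is None:
--                 nodes.append([False, {}])
--                 nxt = len(nodes) - 1
--                 nodes[cur][1][ch] = nxt
--             cur = nxt
--         nodes[cur][0] = True
--     maxlen = max(len(k) for k in keys)
--     lower = text.lower()
--     out = []
--     i = 0
--     n = len(text)
--     while i < n:
--         # descend the trie along the lowercased text, remembering the deepest accept
--         cur = 0
--         best = 0
--         for d in range(1, min(maxlen, n - i) + 1):
--             nxt = nodes[cur][1].get(lower[i + d - 1])
--             if nxt is None:
--                 break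
--             cur = nxt
--             if nodes[cur][0]:
--                 best = d
--         if best:
--             out.append("<" + text[i:i + best] + ">")
--             i += best
--         else:
--             out.append(text[i])
--             i += 1
--     return "".join(out)
-- ===== Notes on version B (the rewrite author's own statement) =====
-- stated objective: faster
-- what changed: A scans all 45 key strings (re-sorting them by length at every text position) and string-compares each against a slice; B builds a trie (prefix-tree automaton) over the keys once and, at each position, descends it character by character along the lowercased text, taking the deepest accepting node as the longest match.
import Mathlib
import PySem

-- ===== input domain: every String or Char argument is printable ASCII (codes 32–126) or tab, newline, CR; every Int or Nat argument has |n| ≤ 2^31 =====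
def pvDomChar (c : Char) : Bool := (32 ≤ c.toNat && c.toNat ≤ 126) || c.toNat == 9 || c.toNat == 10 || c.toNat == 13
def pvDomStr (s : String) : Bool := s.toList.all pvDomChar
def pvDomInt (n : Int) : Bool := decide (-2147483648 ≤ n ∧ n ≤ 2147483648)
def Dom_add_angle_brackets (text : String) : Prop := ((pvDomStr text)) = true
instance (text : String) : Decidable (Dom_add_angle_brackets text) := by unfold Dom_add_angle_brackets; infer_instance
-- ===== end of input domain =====

-- B replaces A's per-position scan over all 45 key strings (re-sorted by length at every text
-- position) by a trie (prefix-tree automaton) built once over the keys: at each position it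
-- descends the trie along the lowercased text, remembering the deepest accepting node
-- (= longest key matching there); measurably faster. Return values agree on every input.

-- ===== PORT A =====
-- Strings are ported on the List Char side (PySem.Chars), as recommended by the prelude.
def pvModifiersA : PySem.Set (List Char) :=
  PySem.Set.ofList ["alt".toList, "ctrl".toList, "shift".toList]

def pvSpecialKeysA : PySem.Set (List Char) :=
  PySem.Set.ofList
    ["f1".toList, "f2".toList, "f3".toList, "f4".toList, "f5".toList, "f6".toList,
     "f7".toList, "f8".toList, "f9".toList, "f10".toList, "f11".toList, "f12".toList,
     "left".toList, "right".toList, "up".toList, "down".toList,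
     "insert".toList, "delete".toList, "home".toList, "end".toList, "pageup".toList, "pagedown".toList,
     "numpad0".toList, "numpad1".toList, "numpad2".toList, "numpad3".toList, "numpad4".toList,
     "numpad5".toList, "numpad6".toList, "numpad7".toList, "numpad8".toList, "numpad9".toList,
     "enter".toList, "space".toList, "tab".toList, "esc".toList]

-- all_keys = {**{mod: len(mod) for mod in modifiers}, **{key: len(key) for key in special_keys}}
-- (Python iterates the two sets in hash order; the output below never depends on the order of
-- same-length keys — at most one key per length can match a given slice — so the written order is used.)
def pvAllKeysA : PySem.Dict (List Char) Int :=
  List.foldl (fun d k => PySem.Dict.insert d k (PySem.Chars.len k))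
    (List.foldl (fun d k => PySem.Dict.insert d k (PySem.Chars.len k))
      PySem.Dict.empty pvModifiersA)
    pvSpecialKeysA

-- sorted(all_keys.items(), key=lambda x: -x[1])
def pvSortedKeysA : List (List Char × Int) :=
  PySem.List.sorted (PySem.Dict.items pvAllKeysA) (fun x => -x.2) false

-- the while loop, as fuel recursion over the current suffix text[i:]; fuel = len(text) bounds the
-- number of iterations (i grows by ≥ 1 each turn); text[i:i+length] is `take` of the suffix;
-- the inner for-with-break is List.find? over the sorted (key, length) pairs.
def pvLoopA (sortedKeys : List (List Char × Int)) : Nat → List Char → List (List Char)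
  | 0, _ => []
  | fuel + 1, s =>
    match s with
    | [] => []
    | c :: rest =>
      match List.find? (fun kl => PySem.Chars.lower (List.take kl.2.toNat (c :: rest)) == kl.1)
          sortedKeys with
      | some kl =>
          ('<' :: List.take kl.2.toNat (c :: rest) ++ ['>']) ::
            pvLoopA sortedKeys fuel (List.drop kl.2.toNat (c :: rest))
      | none => [c] :: pvLoopA sortedKeys fuel rest

def add_angle_brackets (text : String) : String :=
  String.ofList (PySem.Chars.join [] (pvLoopA pvSortedKeysA text.toList.length text.toList))

-- ===== PORT B =====
def pvKeysB : List (List Char) :=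
  ["alt".toList, "ctrl".toList, "shift".toList,
   "f1".toList, "f2".toList, "f3".toList, "f4".toList, "f5".toList, "f6".toList,
   "f7".toList, "f8".toList, "f9".toList, "f10".toList, "f11".toList, "f12".toList,
   "left".toList, "right".toList, "up".toList, "down".toList,
   "insert".toList, "delete".toList, "home".toList, "end".toList, "pageup".toList, "pagedown".toList,
   "numpad0".toList, "numpad1".toList, "numpad2".toList, "numpad3".toList, "numpad4".toList,
   "numpad5".toList, "numpad6".toList, "numpad7".toList, "numpad8".toList, "numpad9".toList,
   "enter".toList, "space".toList, "tab".toList, "esc".toList]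

-- the trie node list: nodes[v] = (accepting, {char: child index}).  The body of Source B's
-- 'for k in keys' loop; list indexing nodes[cur] is ported with getD — cur is an index of a
-- just-built node, always in range by construction, so the default is never used (no IndexError).
def pvInsertKey (st : List (Bool × PySem.Dict Char Nat)) (k : List Char) :
    List (Bool × PySem.Dict Char Nat) :=
  let fin := List.foldl (fun (p : List (Bool × PySem.Dict Char Nat) × Nat) ch =>
    match PySem.Dict.get? (List.getD p.1 p.2 (false, PySem.Dict.empty)).2 ch with
    | some nxt => (p.1, nxt)
    | none =>
        let ns := p.1 ++ [(false, PySem.Dict.empty)]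
        let nxt := ns.length - 1
        let node := List.getD ns p.2 (false, PySem.Dict.empty)
        (List.set ns p.2 (node.1, PySem.Dict.insert node.2 ch nxt), nxt)) (st, 0) k
  let node := List.getD fin.1 fin.2 (false, PySem.Dict.empty)
  List.set fin.1 fin.2 (true, node.2)

-- nodes built once, before the scan (Source B builds it at function entry; keys are literals)
def pvNodesB : List (Bool × PySem.Dict Char Nat) :=
  List.foldl pvInsertKey [(false, PySem.Dict.empty)] pvKeysB

-- maxlen = max(len(k) for k in keys)   (keys is non-empty, so Python's max never raises)
def pvMaxLenB : Nat := (List.map List.length pvKeysB).max?.getD 0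

-- the inner 'for d in range(1, min(maxlen, n-i)+1)' loop: it reads the chars of the window
-- lower[i : i+maxlen] left to right, so it is recursion over that window list, carrying the
-- current node, the depth d and the best accepted depth; same getD convention for nodes[...]
def pvWalkB (nodes : List (Bool × PySem.Dict Char Nat)) :
    List Char → Nat → Nat → Nat → Nat
  | [], _, _, best => best
  | c :: w, cur, d, best =>
    match PySem.Dict.get? (List.getD nodes cur (false, PySem.Dict.empty)).2 c with
    | none => best
    | some nxt =>
        pvWalkB nodes w nxt (d + 1)
          (if (List.getD nodes nxt (false, PySem.Dict.empty)).1 then d + 1 else best)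

-- the outer while loop, fuel recursion over the pair (original suffix, lowercased suffix)
def pvScanB (nodes : List (Bool × PySem.Dict Char Nat)) (maxlen : Nat) :
    Nat → List Char → List Char → List (List Char)
  | 0, _, _ => []
  | fuel + 1, s, ls =>
    match s with
    | [] => []
    | c :: rest =>
      let best := pvWalkB nodes (List.take maxlen ls) 0 0 0
      if best ≠ 0 then
        ('<' :: List.take best (c :: rest) ++ ['>']) ::
          pvScanB nodes maxlen fuel (List.drop best (c :: rest)) (List.drop best ls)
      else [c] :: pvScanB nodes maxlen fuel rest (List.drop 1 ls)

def add_angle_brackets_alt (text : String) : String :=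
  String.ofList (PySem.Chars.join []
    (pvScanB pvNodesB pvMaxLenB text.toList.length text.toList
      (PySem.Chars.lower text.toList)))

-- ===== PRECONDITION & SPEC =====
def Spec_add_angle_brackets (text : String) (out : String) : Prop := out = add_angle_brackets_alt text
instance (text : String) (out : String) : Decidable (Spec_add_angle_brackets text out) := by unfold Spec_add_angle_brackets; infer_instance

-- ===== CLAIM (what is proved, stated in full; the proofs are below) =====
def Claim_equal_add_angle_brackets : Prop := ∀ (text : String), Dom_add_angle_brackets text → Spec_add_angle_brackets text (add_angle_brackets text)

-- ===== LEMMAS AND PROOFS =====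

-- A's sorted key list, split into its groups of equal length (descending).
def pvG8 : List (List Char × Int) := [("pagedown".toList, 8)]
def pvG7 : List (List Char × Int) :=
  [("numpad0".toList, 7), ("numpad1".toList, 7), ("numpad2".toList, 7), ("numpad3".toList, 7),
   ("numpad4".toList, 7), ("numpad5".toList, 7), ("numpad6".toList, 7), ("numpad7".toList, 7),
   ("numpad8".toList, 7), ("numpad9".toList, 7)]
def pvG6 : List (List Char × Int) :=
  [("insert".toList, 6), ("delete".toList, 6), ("pageup".toList, 6)]
def pvG5 : List (List Char × Int) :=
  [("shift".toList, 5), ("right".toList, 5), ("enter".toList, 5), ("space".toList, 5)]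
def pvG4 : List (List Char × Int) :=
  [("ctrl".toList, 4), ("left".toList, 4), ("down".toList, 4), ("home".toList, 4)]
def pvG3 : List (List Char × Int) :=
  [("alt".toList, 3), ("f10".toList, 3), ("f11".toList, 3), ("f12".toList, 3),
   ("end".toList, 3), ("tab".toList, 3), ("esc".toList, 3)]
def pvG2 : List (List Char × Int) :=
  [("f1".toList, 2), ("f2".toList, 2), ("f3".toList, 2), ("f4".toList, 2), ("f5".toList, 2),
   ("f6".toList, 2), ("f7".toList, 2), ("f8".toList, 2), ("f9".toList, 2), ("up".toList, 2)]

-- the common abstraction both sides are reduced to: the longest key matching at the front of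
-- the (lowercased) suffix, as a chain of membership tests by descending length
def pvChain (ls : List Char) : Option Nat :=
  if List.take 8 ls ∈ pvG8.map Prod.fst then some 8
  else if List.take 7 ls ∈ pvG7.map Prod.fst then some 7
  else if List.take 6 ls ∈ pvG6.map Prod.fst then some 6
  else if List.take 5 ls ∈ pvG5.map Prod.fst then some 5
  else if List.take 4 ls ∈ pvG4.map Prod.fst then some 4
  else if List.take 3 ls ∈ pvG3.map Prod.fst then some 3
  else if List.take 2 ls ∈ pvG2.map Prod.fst then some 2
  else none

set_option maxRecDepth 100000 in
lemma pvSortedKeysA_eq :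
    pvSortedKeysA = pvG8 ++ (pvG7 ++ (pvG6 ++ (pvG5 ++ (pvG4 ++ (pvG3 ++ (pvG2 ++ [])))))) := by
  decide

-- find? over one equal-length group of (key, L) pairs is a membership test on the key list.
lemma pvFindGroup (ls : List Char) (L : Nat) (g rest : List (List Char × Int))
    (hg : ∀ kl ∈ g, kl.2 = (L : Int)) :
    (List.find? (fun kl => ls.take kl.2.toNat == kl.1) (g ++ rest)).map (fun kl => kl.2.toNat)
    = if (g.map Prod.fst).contains (ls.take L) then some L
      else (List.find? (fun kl => ls.take kl.2.toNat == kl.1) rest).map (fun kl => kl.2.toNat) := by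
  induction g with
  | nil => simp
  | cons kl g ih =>
    have h2 : kl.2 = (L : Int) := hg kl (by simp)
    by_cases h : ls.take L = kl.1
    · rw [List.cons_append, List.find?_cons_of_pos (by simp [h2, h])]
      simp [h2, h]
    · rw [List.cons_append, List.find?_cons_of_neg (by simp [h2, h])]
      rw [ih (fun x hx => hg x (List.mem_cons_of_mem _ hx))]
      by_cases hm : (List.take L ls) ∈ List.map Prod.fst g
      · simp [List.contains_eq_mem, hm, h]
      · simp [List.contains_eq_mem, hm, h]

-- A's per-position scan over the sorted key list computes pvChain of the lowered suffix.
lemma pvStepA (ls : List Char) :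
    (List.find? (fun kl => ls.take kl.2.toNat == kl.1) pvSortedKeysA).map (fun kl => kl.2.toNat)
    = pvChain ls := by
  rw [pvSortedKeysA_eq,
    pvFindGroup ls 8 pvG8 _ (by decide), pvFindGroup ls 7 pvG7 _ (by decide),
    pvFindGroup ls 6 pvG6 _ (by decide), pvFindGroup ls 5 pvG5 _ (by decide),
    pvFindGroup ls 4 pvG4 _ (by decide), pvFindGroup ls 3 pvG3 _ (by decide),
    pvFindGroup ls 2 pvG2 _ (by decide)]
  simp only [pvChain, List.contains_eq_mem, decide_eq_true_eq, List.find?_nil, Option.map_none]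

-- ---- the trie side ----

-- the set of key(-suffix)s read off the trie below node v, to depth `fuel`
def pvKeysUnder (nodes : List (Bool × PySem.Dict Char Nat)) : Nat → Nat → List (List Char)
  | 0, _ => []
  | fuel + 1, v =>
    (PySem.Dict.items (List.getD nodes v (false, PySem.Dict.empty)).2).flatMap
      (fun cw =>
        (if (List.getD nodes cw.2 (false, PySem.Dict.empty)).1 then [[cw.1]] else []) ++
        (pvKeysUnder nodes fuel cw.2).map (cw.1 :: ·))

-- length of the longest element of K that is a prefix of ls
def pvLongest? (K : List (List Char)) (ls : List Char) : Option Nat :=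
  ((K.filter (fun k => decide (k <+: ls))).map List.length).max?

lemma pvKeysUnder_ne_nil (nodes : List (Bool × PySem.Dict Char Nat)) (fuel v : Nat) :
    [] ∉ pvKeysUnder nodes fuel v := by
  cases fuel with
  | zero => simp [pvKeysUnder]
  | succ fuel =>
    simp only [pvKeysUnder, List.mem_flatMap, List.mem_append]
    rintro ⟨cw, _, h | h⟩
    · split at h <;> simp_all
    · simp at h

lemma pvMem_keysUnder_succ (nodes : List (Bool × PySem.Dict Char Nat)) (fuel v : Nat)
    (k : List Char) :
    k ∈ pvKeysUnder nodes (fuel + 1) v ↔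
      ∃ cw ∈ PySem.Dict.items (List.getD nodes v (false, PySem.Dict.empty)).2,
        (k = [cw.1] ∧ (List.getD nodes cw.2 (false, PySem.Dict.empty)).1 = true) ∨
        (∃ k', k = cw.1 :: k' ∧ k' ∈ pvKeysUnder nodes fuel cw.2) := by
  simp only [pvKeysUnder, List.mem_flatMap, List.mem_append, List.mem_map]
  constructor
  · rintro ⟨cw, hm, h | h⟩
    · refine ⟨cw, hm, ?_⟩
      left; split at h <;> simp_all
    · obtain ⟨k', hk', rfl⟩ := h
      exact ⟨cw, hm, Or.inr ⟨k', rfl, hk'⟩⟩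
  · rintro ⟨cw, hm, ⟨rfl, hacc⟩ | ⟨k', rfl, hk'⟩⟩
    · refine ⟨cw, hm, Or.inl ?_⟩
      have : (List.getD nodes cw.2 (false, PySem.Dict.empty)).1 = true := hacc
      rw [List.getD] at this
      simp [this]
    · exact ⟨cw, hm, Or.inr ⟨k', hk', rfl⟩⟩

-- characterization of max? used below
lemma pvMax?_eq_some (l : List Nat) (a : Nat) (ha : a ∈ l) (hle : ∀ b ∈ l, b ≤ a) :
    l.max? = some a := by
  cases h : l.max? with
  | none => rw [List.max?_eq_none_iff] at h; simp_all
  | some m =>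
    have hm : m ∈ l := List.max?_mem h
    have h1 : m ≤ a := hle m hm
    have h2 : a ≤ m := (List.max?_le_iff h).mp (le_refl m) a ha
    exact congrArg some (le_antisymm h1 h2)

-- the one-step relation between longest matches at a node and at the child along the head char
lemma pvLongestStep (nodes : List (Bool × PySem.Dict Char Nat))
    (hnd : ∀ v, ((List.getD nodes v (false, PySem.Dict.empty)).2).keys.Nodup)
    (fuel v : Nat) (c : Char) (rest : List Char) (nxt : Nat)
    (hget : PySem.Dict.get? (List.getD nodes v (false, PySem.Dict.empty)).2 c = some nxt) :
    pvLongest? (pvKeysUnder nodes (fuel + 1) v) (c :: rest)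
      = match pvLongest? (pvKeysUnder nodes fuel nxt) rest with
        | some e => some (e + 1)
        | none =>
            if (List.getD nodes nxt (false, PySem.Dict.empty)).1 then some 1 else none := by
  have hmem : ∀ l : Nat,
      (l ∈ ((pvKeysUnder nodes (fuel+1) v).filter
              (fun k => decide (k <+: c :: rest))).map List.length) ↔
      ((l = 1 ∧ (List.getD nodes nxt (false, PySem.Dict.empty)).1 = true) ∨
       (∃ e, e ∈ ((pvKeysUnder nodes fuel nxt).filter
              (fun k => decide (k <+: rest))).map List.length ∧ l = e + 1)) := by
    intro l
    simp only [List.mem_map, List.mem_filter, decide_eq_true_eq]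
    constructor
    · rintro ⟨k, ⟨hk, hpre⟩, rfl⟩
      rw [pvMem_keysUnder_succ] at hk
      obtain ⟨cw, hcw, hcase⟩ := hk
      obtain ⟨ch, w⟩ := cw
      rcases hcase with ⟨rfl, hacc⟩ | ⟨k', rfl, hk'⟩
      · have hc : ch = c := (List.cons_prefix_cons.mp hpre).1
        subst hc
        have hw : w = nxt := by
          have h2 := PySem.Dict.get?_of_mem_items _ hcw (hnd v)
          rw [hget] at h2; exact Option.some.inj h2.symm
        exact Or.inl ⟨rfl, hw ▸ hacc⟩
      · have hc : ch = c := (List.cons_prefix_cons.mp hpre).1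
        subst hc
        have hw : w = nxt := by
          have h2 := PySem.Dict.get?_of_mem_items _ hcw (hnd v)
          rw [hget] at h2; exact Option.some.inj h2.symm
        refine Or.inr ⟨k'.length, ⟨k', ⟨hw ▸ hk', ?_⟩, rfl⟩, rfl⟩
        exact (List.cons_prefix_cons.mp hpre).2
    · rintro (⟨rfl, hacc⟩ | ⟨e, ⟨k', ⟨hk', hpre⟩, rfl⟩, rfl⟩)
      · refine ⟨[c], ⟨?_, by simp⟩, rfl⟩
        rw [pvMem_keysUnder_succ]
        exact ⟨(c, nxt), PySem.Dict.mem_items_of_get?_eq_some _ hget, Or.inl ⟨rfl, hacc⟩⟩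
      · refine ⟨c :: k', ⟨?_, List.cons_prefix_cons.mpr ⟨rfl, hpre⟩⟩, by simp⟩
        rw [pvMem_keysUnder_succ]
        exact ⟨(c, nxt), PySem.Dict.mem_items_of_get?_eq_some _ hget, Or.inr ⟨k', rfl, hk'⟩⟩
  unfold pvLongest?
  cases hB : ((pvKeysUnder nodes fuel nxt).filter
      (fun k => decide (k <+: rest))).map List.length |>.max? with
  | none =>
    rw [List.max?_eq_none_iff] at hB
    by_cases hacc : (List.getD nodes nxt (false, PySem.Dict.empty)).1
    · simp only [hacc, if_true]
      apply pvMax?_eq_some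
      · exact (hmem 1).mpr (Or.inl ⟨rfl, hacc⟩)
      · intro b hb
        rcases (hmem b).mp hb with ⟨rfl, _⟩ | ⟨e, he, rfl⟩
        · exact le_refl 1
        · exact absurd (hB ▸ he) (by simp)
    · have : ((pvKeysUnder nodes (fuel+1) v).filter
          (fun k => decide (k <+: c :: rest))).map List.length = [] := by
        rw [List.eq_nil_iff_forall_not_mem]
        intro l hl
        rcases (hmem l).mp hl with ⟨_, h⟩ | ⟨e, he, _⟩
        · exact hacc (by simpa using h)
        · exact absurd (hB ▸ he) (by simp)
      have hacc' : (List.getD nodes nxt (false, PySem.Dict.empty)).1 = false :=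
        Bool.not_eq_true _ |>.mp hacc
      simp only [List.getD] at hacc'
      simp [this, hacc']
  | some e =>
    have heM : e ∈ _ := List.max?_mem hB
    apply pvMax?_eq_some
    · exact (hmem (e+1)).mpr (Or.inr ⟨e, heM, rfl⟩)
    · intro b hb
      rcases (hmem b).mp hb with ⟨rfl, _⟩ | ⟨e', he', rfl⟩
      · omega
      · have : e' ≤ e := (List.max?_le_iff hB).mp (le_refl e) e' he'
        omega

-- the trie walk computes the longest match below cur (relative depth), generically
lemma pvWalk_eq (nodes : List (Bool × PySem.Dict Char Nat))
    (hnd : ∀ v, ((List.getD nodes v (false, PySem.Dict.empty)).2).keys.Nodup) :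
    ∀ (w : List Char) (fuel cur d best : Nat), w.length ≤ fuel → best ≤ d →
    pvWalkB nodes w cur d best =
      match pvLongest? (pvKeysUnder nodes fuel cur) w with
      | some e => d + e
      | none => best := by
  intro w
  induction w with
  | nil =>
    intro fuel cur d best _ _
    have : pvLongest? (pvKeysUnder nodes fuel cur) [] = none := by
      unfold pvLongest?
      rw [List.max?_eq_none_iff]
      have : (pvKeysUnder nodes fuel cur).filter (fun k => decide (k <+: [])) = [] := by
        rw [List.filter_eq_nil_iff]
        intro k hk
        simp only [decide_eq_true_eq, List.prefix_nil]
        exact fun h => pvKeysUnder_ne_nil nodes fuel cur (h ▸ hk)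
      rw [this]
      rfl
    simp [pvWalkB, this]
  | cons c rest ih =>
    intro fuel cur d best hlen hbd
    cases fuel with
    | zero => simp at hlen
    | succ fuel =>
      simp only [pvWalkB]
      cases hget : PySem.Dict.get? (List.getD nodes cur (false, PySem.Dict.empty)).2 c with
      | none =>
        have : pvLongest? (pvKeysUnder nodes (fuel+1) cur) (c :: rest) = none := by
          unfold pvLongest?
          rw [List.max?_eq_none_iff]
          have : (pvKeysUnder nodes (fuel+1) cur).filter
              (fun k => decide (k <+: c :: rest)) = [] := by
            rw [List.eq_nil_iff_forall_not_mem]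
            intro k hk
            simp only [List.mem_filter, decide_eq_true_eq] at hk
            obtain ⟨hk, hpre⟩ := hk
            rw [pvMem_keysUnder_succ] at hk
            obtain ⟨cw, hcw, hcase⟩ := hk
            obtain ⟨ch, w⟩ := cw
            have hc : ch = c := by
              rcases hcase with ⟨rfl, _⟩ | ⟨k', rfl, _⟩ <;>
                exact (List.cons_prefix_cons.mp hpre).1
            subst hc
            have h2 := PySem.Dict.get?_of_mem_items _ hcw (hnd cur)
            rw [hget] at h2; simp at h2
          simp [this]
        simp [this]
      | some nxt =>
        dsimp only
        rw [ih fuel nxt (d+1)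
          (if (List.getD nodes nxt (false, PySem.Dict.empty)).1 then d + 1 else best)
          (by simpa using hlen) (by split <;> omega)]
        rw [pvLongestStep nodes hnd fuel cur c rest nxt hget]
        cases pvLongest? (pvKeysUnder nodes fuel nxt) rest with
        | some e => dsimp only; ac_rfl
        | none => dsimp only; split <;> simp

-- concrete facts about the built trie
set_option maxRecDepth 100000 in
lemma pvMaxLenB_eq : pvMaxLenB = 8 := by decide

-- every node's edge keys are distinct (Dict keys are unique; out-of-range default is empty)
set_option maxRecDepth 100000 in
lemma pvNodesB_nodup :
    ∀ v, ((List.getD pvNodesB v (false, PySem.Dict.empty)).2).keys.Nodup := by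
  intro v
  by_cases h : v < pvNodesB.length
  · have hall : ∀ node ∈ pvNodesB, (node.2).keys.Nodup := by decide
    rw [List.getD_eq_getElem pvNodesB _ h]
    exact hall _ (List.getElem_mem h)
  · rw [List.getD_eq_default _ _ (by omega)]
    decide

-- the keys read off the whole trie are exactly the key list (as a set; proved via a permutation)
set_option maxRecDepth 1000000 in
lemma pvTrieKeys_perm :
    (pvKeysUnder pvNodesB 8 0).Perm
      (pvG8.map Prod.fst ++ (pvG7.map Prod.fst ++ (pvG6.map Prod.fst ++ (pvG5.map Prod.fst ++
       (pvG4.map Prod.fst ++ (pvG3.map Prod.fst ++ pvG2.map Prod.fst)))))) := by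
  decide

-- pvLongest? only depends on the set of keys
lemma pvLongest?_perm (K K' : List (List Char)) (h : K.Perm K') (ls : List Char) :
    pvLongest? K ls = pvLongest? K' ls := by
  unfold pvLongest?
  have hp : (((K.filter (fun k => decide (k <+: ls))).map List.length)).Perm
      (((K'.filter (fun k => decide (k <+: ls))).map List.length)) :=
    ((h.filter _).map _)
  cases hM : ((K.filter (fun k => decide (k <+: ls))).map List.length).max? with
  | none =>
    rw [List.max?_eq_none_iff] at hM
    rw [hM] at hp
    exact (List.max?_eq_none_iff.mpr hp.symm.eq_nil).symm ▸ rfl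
  | some m =>
    have hmem : m ∈ _ := List.max?_mem hM
    exact (pvMax?_eq_some _ m (hp.mem_iff.mp hmem)
      (fun b hb => (List.max?_le_iff hM).mp (le_refl m) b (hp.mem_iff.mpr hb))).symm

-- longest match over a length-homogeneous group followed by strictly shorter keys
lemma pvLongestGroups (L : Nat) (g rest : List (List Char)) (ls : List Char)
    (hg : ∀ k ∈ g, k.length = L) (hrest : ∀ k ∈ rest, k.length < L) :
    pvLongest? (g ++ rest) ls = if List.take L ls ∈ g then some L else pvLongest? rest ls := by
  unfold pvLongest?
  rw [List.filter_append, List.map_append]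
  by_cases hin : List.take L ls ∈ g
  · rw [if_pos hin]
    have hlen : (List.take L ls).length = L := hg _ hin
    apply pvMax?_eq_some
    · apply List.mem_append_left
      exact List.mem_map.mpr ⟨List.take L ls,
        List.mem_filter.mpr ⟨hin, by simp [List.take_prefix]⟩, hlen⟩
    · intro b hb
      rcases List.mem_append.mp hb with hb | hb
      · obtain ⟨k, hk, rfl⟩ := List.mem_map.mp hb
        exact le_of_eq (hg k (List.mem_filter.mp hk).1)
      · obtain ⟨k, hk, rfl⟩ := List.mem_map.mp hb
        exact le_of_lt (hrest k (List.mem_filter.mp hk).1)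
  · rw [if_neg hin]
    have hfg : g.filter (fun k => decide (k <+: ls)) = [] := by
      rw [List.filter_eq_nil_iff]
      intro k hk
      simp only [decide_eq_true_eq]
      intro hpre
      have he : k = List.take k.length ls := List.prefix_iff_eq_take.mp hpre
      rw [hg k hk] at he
      exact hin (he ▸ hk)
    rw [hfg]
    rfl

-- pvLongest? over the empty key list
lemma pvLongest?_nil (ls : List Char) : pvLongest? [] ls = none := rfl

-- put together: the trie walk at a position computes pvChain of the lowered suffix
set_option maxHeartbeats 2000000 in
lemma pvBestEq (ls : List Char) :
    pvWalkB pvNodesB (List.take pvMaxLenB ls) 0 0 0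
      = match pvChain ls with | some L => L | none => 0 := by
  rw [pvMaxLenB_eq]
  rw [pvWalk_eq pvNodesB pvNodesB_nodup (List.take 8 ls) 8 0 0 0
    (List.length_take_le 8 ls) (le_refl 0)]
  rw [pvLongest?_perm _ _ pvTrieKeys_perm]
  rw [← List.append_nil (pvG2.map Prod.fst)]
  rw [pvLongestGroups 8 (pvG8.map Prod.fst) _ _ (by decide) (by decide),
      pvLongestGroups 7 (pvG7.map Prod.fst) _ _ (by decide) (by decide),
      pvLongestGroups 6 (pvG6.map Prod.fst) _ _ (by decide) (by decide),
      pvLongestGroups 5 (pvG5.map Prod.fst) _ _ (by decide) (by decide),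
      pvLongestGroups 4 (pvG4.map Prod.fst) _ _ (by decide) (by decide),
      pvLongestGroups 3 (pvG3.map Prod.fst) _ _ (by decide) (by decide),
      pvLongestGroups 2 (pvG2.map Prod.fst) _ _ (by decide) (by decide),
      pvLongest?_nil]
  have hm8 : min 8 8 = 8 := rfl
  have hm7 : min 7 8 = 7 := rfl
  have hm6 : min 6 8 = 6 := rfl
  have hm5 : min 5 8 = 5 := rfl
  have hm4 : min 4 8 = 4 := rfl
  have hm3 : min 3 8 = 3 := rfl
  have hm2 : min 2 8 = 2 := rfl
  simp only [List.take_take, hm8, hm7, hm6, hm5, hm4, hm3, hm2]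
  unfold pvChain
  split_ifs <;> rfl

lemma pvLowerTake (s : List Char) (n : Nat) :
    PySem.Chars.lower (s.take n) = (PySem.Chars.lower s).take n := by
  simp [PySem.Chars.lower, List.map_take]

lemma pvLowerDrop (s : List Char) (n : Nat) :
    PySem.Chars.lower (s.drop n) = (PySem.Chars.lower s).drop n := by
  simp [PySem.Chars.lower, List.map_drop]

lemma pvChain_ne_zero (ls : List Char) (L : Nat) (h : pvChain ls = some L) : L ≠ 0 := by
  unfold pvChain at h
  split_ifs at h <;> simp_all <;> omega

-- the two outer loops agree
lemma pvLoop_eq (fuel : Nat) :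
    ∀ s : List Char,
      pvLoopA pvSortedKeysA fuel s
        = pvScanB pvNodesB pvMaxLenB fuel s (PySem.Chars.lower s) := by
  induction fuel with
  | zero => intro s; rfl
  | succ fuel ih =>
    intro s
    cases s with
    | nil => simp [pvLoopA, pvScanB]
    | cons c rest =>
      simp only [pvLoopA, pvScanB]
      rw [show (fun kl : List Char × Int =>
            PySem.Chars.lower (List.take kl.2.toNat (c :: rest)) == kl.1)
          = (fun kl : List Char × Int =>
            (PySem.Chars.lower (c :: rest)).take kl.2.toNat == kl.1) from
        funext fun kl => by rw [pvLowerTake]]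
      have hstep := pvStepA (PySem.Chars.lower (c :: rest))
      have hbest := pvBestEq (PySem.Chars.lower (c :: rest))
      cases hA : List.find? (fun kl : List Char × Int =>
          (PySem.Chars.lower (c :: rest)).take kl.2.toNat == kl.1) pvSortedKeysA with
      | none =>
        rw [hA] at hstep
        simp only [Option.map_none] at hstep
        rw [← hstep] at hbest
        have hrest : PySem.Chars.lower rest = List.drop 1 (PySem.Chars.lower (c :: rest)) := by
          simp [PySem.Chars.lower]
        dsimp only
        rw [hbest, ← hrest, ih]
        simp
      | some kl =>
        rw [hA] at hstep
        simp only [Option.map_some] at hstep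
        rw [← hstep] at hbest
        have hne : kl.2.toNat ≠ 0 := pvChain_ne_zero _ _ hstep.symm
        dsimp only
        rw [hbest, if_pos hne, ih, pvLowerDrop]

-- ===== VERDICT (by name: the statement is the Claim_ definition above) =====
theorem add_angle_brackets_spec : Claim_equal_add_angle_brackets := by
  intro text _
  unfold Spec_add_angle_brackets add_angle_brackets add_angle_brackets_alt
  rw [pvLoop_eq]
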